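-- pv_equiv track=rewrite | github.com/VorobevPavell/python | codewars/split_strings.py | solution
-- ===== SOURCE A (Python) =====
-- def solution(s):
--     m = []
--     if len(s) % 2 != 0:
--         s = s + '_'
--     for i in range(len(s)):
--         orig_i = i
--         res = s[orig_i-1] + s[orig_i]
--         if i % 2 == 1:
--             m.append(res)
--     return m
-- ===== SOURCE B (Python) =====
-- def solution(s):
--     if len(s) % 2 != 0:
--         s = s + '_'
--     return [s[i:i+2] for i in range(0, len(s), 2)]
-- ===== Notes on version B (the rewrite author's own statement) =====
-- stated objective: simpler
-- what changed: Instead of scanning every index and rebuilding each pair from s[i-1]+s[i] under an odd-parity test, B iterates over pair start positions with step 2 and slices each pair directly (half the loop iterations, one comprehension).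
import Mathlib
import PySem

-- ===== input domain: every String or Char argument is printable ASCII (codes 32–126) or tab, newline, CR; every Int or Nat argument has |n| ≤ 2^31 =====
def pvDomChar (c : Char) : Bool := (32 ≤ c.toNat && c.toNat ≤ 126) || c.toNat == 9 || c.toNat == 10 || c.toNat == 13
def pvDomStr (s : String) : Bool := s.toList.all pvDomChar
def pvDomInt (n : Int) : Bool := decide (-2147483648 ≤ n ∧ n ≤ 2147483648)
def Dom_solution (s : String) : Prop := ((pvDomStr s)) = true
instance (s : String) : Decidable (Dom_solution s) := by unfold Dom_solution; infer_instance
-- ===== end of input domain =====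

-- B pads the same way but iterates over pair start positions with step 2 and slices each pair,
-- instead of A's scan of every index rebuilding s[i-1]+s[i] under an odd-parity test (simpler decomposition).


-- ===== PORT A =====
-- loop body of A: res = s[i-1] + s[i] (always computed); appended only when i % 2 == 1
def stepA (t : List Char) (m : List String) (i : Int) : List String :=
  let res := [PySem.List.pyGetD t (i - 1) ' ', PySem.List.pyGetD t i ' ']
  if PySem.Int.mod i 2 = 1 then m ++ [String.ofList res] else m

def solution (s : String) : List String :=
  let t := if PySem.Int.mod (PySem.Str.len s) 2 ≠ 0 then s.toList ++ ['_'] else s.toList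
  (PySem.List.pyRange 0 (PySem.List.len t) 1).foldl (stepA t) []

-- ===== PORT B =====
def solution_alt (s : String) : List String :=
  let t := if PySem.Int.mod (PySem.Str.len s) 2 ≠ 0 then s.toList ++ ['_'] else s.toList
  (PySem.List.pyRange 0 (PySem.List.len t) 2).map
    (fun i => String.ofList (PySem.List.slice t (some i) (some (i + 2))))

-- ===== PRECONDITION & SPEC =====
def Spec_solution (s : String) (out : List String) : Prop := out = solution_alt s
instance (s : String) (out : List String) : Decidable (Spec_solution s out) := by unfold Spec_solution; infer_instance

-- ===== CLAIM (what is proved, stated in full; the proofs are below) =====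
def Claim_equal_solution : Prop := ∀ (s : String), Dom_solution s → Spec_solution s (solution s)

-- ===== LEMMAS AND PROOFS =====

-- the list of consecutive pairs of an (even-length) list: common characterisation of both ports
def pairs : List Char → List String
  | a :: b :: rest => String.ofList [a, b] :: pairs rest
  | _ => []

theorem pyRange_two_cons {a b : Int} (h : a < b) :
    PySem.List.pyRange a b 2 = a :: PySem.List.pyRange (a + 2) b 2 := by
  rw [PySem.List.pyRange_of_pos a b (by norm_num), PySem.List.pyRange_of_pos (a + 2) b (by norm_num)]
  have h1 : ((b - a + 2 - 1) / 2).toNat = ((b - (a + 2) + 2 - 1) / 2).toNat + 1 := by omega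
  simp only [if_pos h, h1]
  rw [List.range_succ_eq_map]
  simp only [List.map_cons, List.map_map]
  congr 1
  · norm_num
  · by_cases h2 : a + 2 < b
    · simp only [if_pos h2]
      apply List.map_congr_left
      intro k _
      simp only [Function.comp]
      push_cast
      ring
    · simp only [if_neg h2]
      have : ((b - (a + 2) + 2 - 1) / 2).toNat = 0 := by omega
      simp [this]

theorem drop_lt {α : Type} {t : List α} {a : Nat} {x : α} {l : List α}
    (h : t.drop a = x :: l) : a < t.length := by
  by_contra hc
  rw [List.drop_eq_nil_of_le (by omega)] at h
  simp at h

theorem getD_of_drop {α : Type} [Inhabited α] {t : List α} {a : Nat} {x : α} {l : List α}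
    (h : t.drop a = x :: l) (d : α) : t.getD a d = x := by
  have hx : t[a]? = some x := by
    have h0 : (t.drop a)[0]? = t[a + 0]? := List.getElem?_drop
    rw [h] at h0
    simpa using h0.symm
  simp [List.getD_eq_getElem?_getD, hx]

theorem lemA : ∀ (u t : List Char) (a : Nat) (acc : List String),
    t.drop a = u → u.length % 2 = 0 → a % 2 = 0 →
    (PySem.List.pyRange (a : Int) (t.length : Int) 1).foldl (stepA t) acc = acc ++ pairs u
  | [], t, a, acc, hd, _, _ => by
    have hle : t.length ≤ a := List.drop_eq_nil_iff.mp hd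
    rw [PySem.List.pyRange_one_eq_nil (by exact_mod_cast hle)]
    simp [pairs]
  | [x], _, _, _, _, h, _ => by simp at h
  | x :: y :: rest, t, a, acc, hd, hlen, ha => by
    have h1 : a < t.length := drop_lt hd
    have hd2 : t.drop (a + 1) = y :: rest := by
      have : (t.drop a).drop 1 = y :: rest := by rw [hd]; rfl
      rwa [List.drop_drop] at this
    have h2 : a + 1 < t.length := drop_lt hd2
    rw [PySem.List.pyRange_one_cons (by exact_mod_cast h1)]
    rw [show ((a : Int) + 1) = ((a + 1 : Nat) : Int) by push_cast; ring]
    rw [PySem.List.pyRange_one_cons (by exact_mod_cast h2)]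
    rw [show (((a + 1 : Nat) : Int) + 1) = ((a + 2 : Nat) : Int) by push_cast; ring]
    simp only [List.foldl_cons]
    have hstep0 : stepA t acc (a : Int) = acc := by
      unfold stepA
      rw [PySem.Int.mod_eq_emod_of_pos (by norm_num)]
      simp only []
      rw [if_neg (by omega)]
    have hstep1 : stepA t acc ((a + 1 : Nat) : Int) = acc ++ [String.ofList [x, y]] := by
      unfold stepA
      rw [PySem.Int.mod_eq_emod_of_pos (by norm_num)]
      rw [if_pos (by omega)]
      rw [show (((a + 1 : Nat) : Int) - 1) = ((a : Nat) : Int) by push_cast; ring]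
      rw [PySem.List.pyGetD_natCast, PySem.List.pyGetD_natCast]
      rw [getD_of_drop hd, getD_of_drop hd2]
    rw [hstep0, hstep1]
    have hd3 : t.drop (a + 2) = rest := by
      have : (t.drop a).drop 2 = rest := by rw [hd]; rfl
      rwa [List.drop_drop] at this
    rw [lemA rest t (a + 2) (acc ++ [String.ofList [x, y]]) hd3 (by simp at hlen; omega) (by omega)]
    simp [pairs]

theorem lemB : ∀ (u t : List Char) (a : Nat),
    t.drop a = u → u.length % 2 = 0 →
    (PySem.List.pyRange (a : Int) (t.length : Int) 2).map
      (fun i => String.ofList (PySem.List.slice t (some i) (some (i + 2)))) = pairs u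
  | [], t, a, hd, _ => by
    have hle : t.length ≤ a := List.drop_eq_nil_iff.mp hd
    rw [PySem.List.pyRange_of_pos _ _ (by norm_num : (0:Int) < 2)]
    rw [if_neg (by exact_mod_cast not_lt.mpr hle)]
    simp [pairs]
  | [x], _, _, _, h => by simp at h
  | x :: y :: rest, t, a, hd, hlen => by
    have h1 : a < t.length := drop_lt hd
    rw [pyRange_two_cons (by exact_mod_cast h1)]
    simp only [List.map_cons]
    have hslice : PySem.List.slice t (some (a : Int)) (some ((a : Int) + 2)) = [x, y] := by
      rw [show ((a : Int) + 2) = ((a : Int) + ((2 : Nat) : Int)) by norm_num]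
      rw [PySem.List.slice_natCast_add]
      rw [hd]
      rfl
    rw [hslice]
    have hd3 : t.drop (a + 2) = rest := by
      have : (t.drop a).drop 2 = rest := by rw [hd]; rfl
      rwa [List.drop_drop] at this
    rw [show ((a : Int) + 2) = ((a + 2 : Nat) : Int) by push_cast; ring]
    rw [lemB rest t (a + 2) hd3 (by simp at hlen; omega)]
    simp [pairs]

theorem padded_even (s : String) :
    (if PySem.Int.mod (PySem.Str.len s) 2 ≠ 0 then s.toList ++ ['_'] else s.toList).length % 2 = 0 := by
  have hlen : PySem.Str.len s = (s.toList.length : Int) := by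
    simp [pysem]
  rw [hlen, PySem.Int.mod_eq_emod_of_pos (by norm_num)]
  split_ifs with h
  · simp only [List.length_append, List.length_cons, List.length_nil]
    omega
  · omega

-- ===== VERDICT (by name: the statement is the Claim_ definition above) =====
theorem solution_spec : Claim_equal_solution := by
  intro s _
  unfold Spec_solution
  have heven := padded_even s
  simp only [solution, solution_alt, PySem.List.len_eq]
  generalize hg : (if PySem.Int.mod (PySem.Str.len s) 2 ≠ 0 then s.toList ++ ['_'] else s.toList) = t at heven ⊢
  rw [show (0 : Int) = ((0 : Nat) : Int) by norm_num]
  rw [lemA t t 0 [] rfl heven rfl, lemB t t 0 rfl heven]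
  simp
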